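-- pv_equiv track=rewrite | github.com/ansible/ansibullbot | ansibullbot/triagers/ansible.py | negate_command
-- ===== SOURCE A (Python) =====
-- def negate_command(command, commands):
--     # negate bot_broken  ... bot_broken vs. !bot_broken
--     positive = command
--     negative = u'!' + command
--
--     bb = [x for x in commands if positive in x]
--     if bb:
--         for x in bb:
--             if x == negative:
--                 if positive in commands:
--                     commands.remove(positive)
--                 if negative in commands:
--                     commands.remove(negative)
--
--     return commands
-- ===== SOURCE B (Python) =====
-- def negate_command(command, commands):
--     # One linear pass: drop up to n occurrences of command and of '!'+command,
--     # where n = number of '!'+command entries; writes back in place like A.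
--     negative = '!' + command
--     n = commands.count(negative)
--     result = []
--     p = 0
--     for x in commands:
--         if x == negative:
--             continue
--         if x == command and p < n:
--             p += 1
--             continue
--         result.append(x)
--     commands[:] = result
--     return commands
-- ===== Notes on version B (the rewrite author's own statement) =====
-- stated objective: alternative
-- what changed: Replaces A's substring-filtered snapshot plus repeated guarded list.remove calls with a single forward pass that counts n = commands.count('!'+command) once and then skips up to n occurrences of the command and all of its negation using a bounded counter.
import Mathlib
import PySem

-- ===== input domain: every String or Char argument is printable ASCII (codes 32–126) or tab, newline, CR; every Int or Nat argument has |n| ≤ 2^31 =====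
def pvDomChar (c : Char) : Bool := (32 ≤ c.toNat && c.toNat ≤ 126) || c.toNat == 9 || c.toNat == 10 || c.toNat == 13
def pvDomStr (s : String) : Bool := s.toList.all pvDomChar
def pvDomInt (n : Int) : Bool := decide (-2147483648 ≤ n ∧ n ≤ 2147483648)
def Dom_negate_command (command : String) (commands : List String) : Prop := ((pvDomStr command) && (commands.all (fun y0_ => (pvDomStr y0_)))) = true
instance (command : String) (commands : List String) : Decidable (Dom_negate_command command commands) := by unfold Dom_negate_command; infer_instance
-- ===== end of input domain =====

-- B replaces A's substring-filtered snapshot plus repeated guarded list.remove calls with a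
-- single forward counting pass (objective: alternative); equivalence is about the return value
-- (both A and B mutate `commands` in place; B via `commands[:] = result`).


-- ===== PORT A =====
def negate_command (command : String) (commands : List String) : List String :=
  let positive := command
  -- u'!' + command : exact string concatenation, done on the character list
  let negative := String.ofList ('!' :: command.toList)
  -- bb = [x for x in commands if positive in x]
  let bb := commands.filter (fun x => PySem.Str.isIn positive x)
  if bb.isEmpty then commands
  else
    -- for x in bb: if x == negative: (guarded remove of positive, then of negative)
    bb.foldl (fun cs x =>
      if x = negative then
        let cs := if positive ∈ cs then (PySem.List.remove? cs positive).getD cs else cs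
        if negative ∈ cs then (PySem.List.remove? cs negative).getD cs else cs
      else cs) commands

-- ===== PORT B =====
-- the for-loop of Source B: skip every `negative`, skip `positive` while p < n, keep the rest
def pvAltGo (negative positive : String) (n : Nat) (p : Nat) : List String → List String
  | [] => []
  | x :: xs =>
    if x = negative then pvAltGo negative positive n p xs
    else if x = positive ∧ p < n then pvAltGo negative positive n (p + 1) xs
    else x :: pvAltGo negative positive n p xs

def negate_command_alt (command : String) (commands : List String) : List String :=
  let negative := String.ofList ('!' :: command.toList)
  let n := PySem.List.count commands negative
  pvAltGo negative command n 0 commands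

-- ===== PRECONDITION & SPEC =====
def Spec_negate_command (command : String) (commands : List String) (out : List String) : Prop := out = negate_command_alt command commands
instance (command : String) (commands : List String) (out : List String) : Decidable (Spec_negate_command command commands out) := by unfold Spec_negate_command; infer_instance

-- ===== CLAIM (what is proved, stated in full; the proofs are below) =====
def Claim_equal_negate_command : Prop := ∀ (command : String) (commands : List String), Dom_negate_command command commands → Spec_negate_command command commands (negate_command command commands)

-- ===== LEMMAS AND PROOFS =====

-- proof-side normal form: drop the first k occurrences of v
def pvDropN (v : String) : Nat → List String → List String
  | _, [] => []
  | 0, x :: xs => x :: pvDropN v 0 xs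
  | k + 1, x :: xs => if x = v then pvDropN v k xs else x :: pvDropN v (k + 1) xs

theorem pvDropN_zero (v : String) (xs : List String) : pvDropN v 0 xs = xs := by
  induction xs with
  | nil => rfl
  | cons x xs ih => simp [pvDropN, ih]

-- A's guarded `commands.remove(v)` is pvDropN v 1
theorem pvRemoveIf_eq (v : String) (cs : List String) :
    (if v ∈ cs then (PySem.List.remove? cs v).getD cs else cs) = pvDropN v 1 cs := by
  induction cs with
  | nil => simp [pvDropN]
  | cons x cs ih =>
    by_cases hx : x = v
    · subst hx
      simp [pvDropN, PySem.List.remove?_cons_self, pvDropN_zero]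
    · rw [pvDropN]
      simp only [if_neg hx]
      by_cases hm : v ∈ cs
      · have hmem : v ∈ x :: cs := List.mem_cons_of_mem x hm
        rw [if_pos hmem, PySem.List.remove?_eq_some_erase _ _ hmem, Option.getD_some,
          List.erase_cons_tail (by simpa using hx)]
        have := ih
        rw [if_pos hm, PySem.List.remove?_eq_some_erase _ _ hm, Option.getD_some] at this
        exact congrArg (x :: ·) this
      · have hnm : v ∉ x :: cs := by simp [hm, Ne.symm hx]
        rw [if_neg hnm]
        have := ih
        rw [if_neg hm] at this
        exact congrArg (x :: ·) this

theorem pvDropN_one_dropN (v : String) (xs : List String) :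
    ∀ k, pvDropN v 1 (pvDropN v k xs) = pvDropN v (k + 1) xs := by
  induction xs with
  | nil => intro k; cases k <;> rfl
  | cons x xs ih =>
    intro k
    by_cases hx : x = v
    · cases k with
      | zero => simp [pvDropN, hx, pvDropN_zero]
      | succ k => simp [pvDropN, hx, ih k]
    · cases k with
      | zero => simp [pvDropN, hx, ih 0]
      | succ k => simp [pvDropN, hx, ih (k + 1)]

theorem pvDropN_comm {v w : String} (hvw : v ≠ w) (xs : List String) :
    ∀ a b, pvDropN v a (pvDropN w b xs) = pvDropN w b (pvDropN v a xs) := by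
  induction xs with
  | nil => intro a b; cases a <;> cases b <;> rfl
  | cons x xs ih =>
    intro a b
    by_cases hxv : x = v
    · subst hxv
      have hxw : x ≠ w := hvw
      cases a with
      | zero => cases b with
        | zero => simp [pvDropN_zero]
        | succ b => simp [pvDropN_zero, pvDropN, hxw]
      | succ a => cases b with
        | zero => simp [pvDropN_zero]
        | succ b => simp [pvDropN, hxw, ih a (b + 1)]
    · by_cases hxw : x = w
      · subst hxw
        cases b with
        | zero => simp [pvDropN_zero]
        | succ b => cases a with
          | zero => simp [pvDropN_zero, pvDropN]
          | succ a => simp [pvDropN, hxv, ih (a + 1) b]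
      · cases a with
        | zero => simp [pvDropN_zero]
        | succ a => cases b with
          | zero => simp [pvDropN_zero]
          | succ b => simp [pvDropN, hxv, hxw, ih (a + 1) (b + 1)]

-- A's loop body at x = negative
def pvStep (neg pos : String) (cs : List String) : List String :=
  pvDropN neg 1 (pvDropN pos 1 cs)

theorem pvFold_eq_iterate (neg pos : String) (bb : List String) :
    ∀ init, bb.foldl (fun cs x =>
      if x = neg then
        let cs := if pos ∈ cs then (PySem.List.remove? cs pos).getD cs else cs
        if neg ∈ cs then (PySem.List.remove? cs neg).getD cs else cs
      else cs) init = (pvStep neg pos)^[bb.count neg] init := by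
  induction bb with
  | nil => intro init; rfl
  | cons x bb ih =>
    intro init
    by_cases hx : x = neg
    · subst hx
      rw [List.foldl_cons, List.count_cons_self, Function.iterate_succ_apply]
      rw [← ih (pvStep x pos init)]
      simp only [if_true]
      rw [pvRemoveIf_eq pos init, pvRemoveIf_eq x (pvDropN pos 1 init)]
      rfl
    · rw [List.foldl_cons, List.count_cons_of_ne hx]
      simp only [if_neg hx]
      exact ih init

theorem pvIterate_eq (neg pos : String) (hne : pos ≠ neg) (m : Nat) (xs : List String) :
    (pvStep neg pos)^[m] xs = pvDropN neg m (pvDropN pos m xs) := by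
  induction m with
  | zero => simp [pvDropN_zero]
  | succ m ih =>
    rw [Function.iterate_succ_apply', ih]
    unfold pvStep
    rw [pvDropN_comm hne _ 1 m, pvDropN_one_dropN, pvDropN_one_dropN]

theorem pvAltGo_eq (neg pos : String) (hne : pos ≠ neg) (n : Nat) (xs : List String) :
    ∀ p, pvAltGo neg pos n p xs = pvDropN pos (n - p) (pvDropN neg (xs.count neg) xs) := by
  induction xs with
  | nil => intro p; cases n - p <;> rfl
  | cons x xs ih =>
    intro p
    by_cases hx : x = neg
    · subst hx
      rw [List.count_cons_self]
      have : pvDropN x (xs.count x + 1) (x :: xs) = pvDropN x (xs.count x) xs := by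
        simp [pvDropN]
      rw [this, pvAltGo, if_pos rfl, ih p]
    · rw [List.count_cons_of_ne hx]
      have hkeep : pvDropN neg (xs.count neg) (x :: xs) = x :: pvDropN neg (xs.count neg) xs := by
        cases h : xs.count neg with
        | zero => simp [pvDropN_zero]
        | succ k => simp [pvDropN, hx]
      rw [hkeep]
      by_cases hxp : x = pos
      · subst hxp
        by_cases hp : p < n
        · have h1 : n - p = (n - (p + 1)) + 1 := by omega
          rw [pvAltGo, if_neg (by intro h; exact hx h), if_pos ⟨rfl, hp⟩, ih (p + 1), h1]
          simp [pvDropN]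
        · have h0 : n - p = 0 := by omega
          rw [pvAltGo, if_neg (by intro h; exact hx h), if_neg (by rintro ⟨-, h⟩; exact hp h),
            ih p, h0, pvDropN_zero, pvDropN_zero]
      · rw [pvAltGo, if_neg (by intro h; exact hx h), if_neg (by rintro ⟨h, -⟩; exact hxp h), ih p]
        cases h : n - p with
        | zero => simp [pvDropN_zero]
        | succ k => simp [pvDropN, hxp]

theorem pvPos_ne_neg (command : String) : command ≠ String.ofList ('!' :: command.toList) := by
  intro h
  have := congrArg (fun s => s.toList.length) h
  simp at this

theorem pvIsIn_neg (command : String) :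
    PySem.Str.isIn command (String.ofList ('!' :: command.toList)) = true := by
  rw [PySem.Str.isIn_iff_infix]
  simp only [String.toList_ofList]
  exact ⟨['!'], [], by simp⟩

theorem pvCount_filter {P : String → Bool} {v : String} (h : P v = true) (xs : List String) :
    (xs.filter P).count v = xs.count v := by
  induction xs with
  | nil => rfl
  | cons x xs ih =>
    by_cases hx : x = v
    · subst hx; rw [List.filter_cons, h, List.count_cons_self]; simpa using ih
    · rw [List.filter_cons, List.count_cons_of_ne hx]
      cases hP : P x
      · simpa using ih
      · simpa [List.count_cons_of_ne hx] using ih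

-- ===== VERDICT (by name: the statement is the Claim_ definition above) =====
theorem negate_command_spec : Claim_equal_negate_command := by
  intro command commands _
  unfold Spec_negate_command negate_command negate_command_alt
  simp only []
  set pos := command with hpos
  set neg := String.ofList ('!' :: command.toList) with hneg
  have hne : pos ≠ neg := pvPos_ne_neg command
  have hcnt : (commands.filter (fun x => PySem.Str.isIn pos x)).count neg = commands.count neg :=
    pvCount_filter (pvIsIn_neg command) commands
  have hA : (if (commands.filter (fun x => PySem.Str.isIn pos x)).isEmpty then commands
      else (commands.filter (fun x => PySem.Str.isIn pos x)).foldl (fun cs x =>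
        if x = neg then
          let cs := if pos ∈ cs then (PySem.List.remove? cs pos).getD cs else cs
          if neg ∈ cs then (PySem.List.remove? cs neg).getD cs else cs
        else cs) commands)
      = pvDropN neg (commands.count neg) (pvDropN pos (commands.count neg) commands) := by
    by_cases hbb : (commands.filter (fun x => PySem.Str.isIn pos x)).isEmpty
    · rw [if_pos hbb]
      have h0 : commands.count neg = 0 := by
        rw [← hcnt, List.isEmpty_iff.mp hbb]
        rfl
      rw [h0, pvDropN_zero, pvDropN_zero]
    · rw [if_neg hbb, pvFold_eq_iterate, hcnt, pvIterate_eq neg pos hne]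
  rw [hA, pvAltGo_eq neg pos hne, Nat.sub_zero]
  have : PySem.List.count commands neg = commands.count neg := PySem.List.count_eq commands neg
  rw [this, pvDropN_comm hne]
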